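-- pv_equiv track=rewrite | github.com/florinsalasan/AdventOfCode | 2024advent/day02/pt2.py | is_ascending
-- ===== SOURCE A (Python) =====
-- def is_ascending(input_list, base_list):
--     list_len = len(input_list)
--     for i in range(1, list_len):
--         should_be_smaller = input_list[i - 1]
--         comparison_value = input_list[i]
--         if (should_be_smaller >= comparison_value or
--                 comparison_value - should_be_smaller > 3) and base_list:
--             # If we reach this point we need to check if any sublist with
--             # one item removed would pass probably ideal to remove at the
--             # index where it fails
--             sublists = [is_ascending(input_list[:j] + input_list[j + 1:], False) for
--                         j in range(list_len)]
--             return any(sublists)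
--
--         elif (should_be_smaller >= comparison_value or
--                 comparison_value - should_be_smaller > 3) and not base_list:
--             return False
--
--     return True
-- ===== SOURCE B (Python) =====
-- def _removed(lst, j):
--     return lst[:j] + lst[j + 1:]
--
--
-- def _strict(lst):
--     return all(a < b <= a + 3 for a, b in zip(lst, lst[1:]))
--
--
-- def is_ascending(input_list, base_list):
--     # Find the first adjacent pair that breaks the ascending/gap rule.
--     i = next((i for i in range(1, len(input_list))
--               if not (input_list[i - 1] < input_list[i] <= input_list[i - 1] + 3)),
--              None)
--     if i is None:
--         return True
--     if not base_list:
--         return False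
--     # Only removing one endpoint of the first bad pair can help.
--     return _strict(_removed(input_list, i - 1)) or _strict(_removed(input_list, i))
-- ===== Notes on version B (the rewrite author's own statement) =====
-- stated objective: faster
-- what changed: Instead of retrying the full scan on every one-element-removed copy of the list (A's comprehension over all n sublists), B locates the first violating adjacent pair in one pass and tests only the two removals that can possibly help: dropping the left or the right element of that pair.
import Mathlib
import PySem

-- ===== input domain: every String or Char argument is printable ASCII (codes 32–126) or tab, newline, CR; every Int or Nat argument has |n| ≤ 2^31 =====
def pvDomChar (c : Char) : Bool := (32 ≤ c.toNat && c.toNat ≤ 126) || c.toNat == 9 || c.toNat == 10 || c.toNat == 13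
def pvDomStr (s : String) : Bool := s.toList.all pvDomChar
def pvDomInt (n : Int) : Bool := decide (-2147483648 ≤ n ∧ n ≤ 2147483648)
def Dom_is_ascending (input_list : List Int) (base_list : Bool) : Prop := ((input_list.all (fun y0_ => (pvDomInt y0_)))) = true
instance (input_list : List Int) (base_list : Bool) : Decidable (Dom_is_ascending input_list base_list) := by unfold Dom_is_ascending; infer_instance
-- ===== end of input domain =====

-- B replaces A's "try deleting every index" retry (O(n^2)) by testing only the two
-- endpoints of the first violating pair (O(n)); objective: faster, asymptotic.

-- ===== PORT A =====
-- cited by isAscLoop's decreasing_by: input_list[:j] + input_list[j+1:] is eraseIdx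
theorem pvSliceErase (l : List Int) (j : Int) (hj : 0 ≤ j) :
    PySem.List.slice l none (some j) ++ PySem.List.slice l (some (j + 1)) none
      = l.eraseIdx j.toNat := by
  rw [PySem.List.slice_to l hj, PySem.List.slice_from l (by omega),
      List.eraseIdx_eq_take_drop_succ]
  have e : (j + 1).toNat = j.toNat + 1 := by omega
  rw [e]

-- the 'for i in range(1, list_len)' loop of A; on the base list a violation triggers
-- the comprehension over all one-removed sublists (the recursive calls with False)
def isAscLoop (input_list : List Int) (base_list : Bool) (i : Nat) : Bool :=
  if h : i < input_list.length then
    let should_be_smaller := PySem.List.pyGetD input_list ((i : Int) - 1) 0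
    let comparison_value := PySem.List.pyGetD input_list (i : Int) 0
    if ((decide (should_be_smaller ≥ comparison_value)
          || decide (comparison_value - should_be_smaller > 3)) && base_list) then
      (((PySem.List.pyRange 0 (PySem.List.len input_list) 1).attach.map (fun j =>
          isAscLoop (PySem.List.slice input_list none (some j.1)
                      ++ PySem.List.slice input_list (some (j.1 + 1)) none) false 1)).any id)
    else if ((decide (should_be_smaller ≥ comparison_value)
          || decide (comparison_value - should_be_smaller > 3)) && !base_list) then
      false
    else
      isAscLoop input_list base_list (i + 1)
  else
    true
termination_by (input_list.length, input_list.length - i)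
decreasing_by
  · have hj := PySem.List.mem_pyRange_one.mp j.2
    simp only [PySem.List.len_eq] at hj
    rw [pvSliceErase input_list j.1 hj.1]
    apply Prod.Lex.left
    rw [List.length_eraseIdx_of_lt (by omega)]
    omega
  · apply Prod.Lex.right
    omega

def is_ascending (input_list : List Int) (base_list : Bool) : Bool :=
  isAscLoop input_list base_list 1

-- ===== PORT B =====
-- Source B's _removed: lst[:j] + lst[j+1:]
def removedB (lst : List Int) (j : Nat) : List Int :=
  PySem.List.slice lst none (some (j : Int)) ++ PySem.List.slice lst (some ((j : Int) + 1)) none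

-- Source B's _strict: all(a < b <= a+3 for a, b in zip(lst, lst[1:]))
def strictB (lst : List Int) : Bool :=
  (lst.zip (PySem.List.slice lst (some 1) none)).all (fun p =>
    decide (p.1 < p.2) && decide (p.2 ≤ p.1 + 3))

-- Source B's next(...): index of the second element of the first violating adjacent pair
def firstBad : List Int → Option Nat
  | x :: y :: t =>
    if decide (x < y) && decide (y ≤ x + 3) then (firstBad (y :: t)).map (· + 1)
    else some 1
  | _ => none

def is_ascending_alt (input_list : List Int) (base_list : Bool) : Bool :=
  match firstBad input_list with
  | none => true
  | some i =>
    if !base_list then false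
    else strictB (removedB input_list (i - 1)) || strictB (removedB input_list i)

-- ===== PRECONDITION & SPEC =====
def Spec_is_ascending (input_list : List Int) (base_list : Bool) (out : Bool) : Prop := out = is_ascending_alt input_list base_list
instance (input_list : List Int) (base_list : Bool) (out : Bool) : Decidable (Spec_is_ascending input_list base_list out) := by unfold Spec_is_ascending; infer_instance

-- ===== CLAIM (what is proved, stated in full; the proofs are below) =====
def Claim_equal_is_ascending : Prop := ∀ (input_list : List Int) (base_list : Bool), Dom_is_ascending input_list base_list → Spec_is_ascending input_list base_list (is_ascending input_list base_list)

-- ===== LEMMAS AND PROOFS =====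

theorem removedB_eq (l : List Int) (j : Nat) : removedB l j = l.eraseIdx j := by
  rw [removedB, pvSliceErase l j (by omega)]
  simp

theorem strictB_nil : strictB [] = true := by simp [strictB]

theorem strictB_singleton (x : Int) : strictB [x] = true := by
  simp [strictB, PySem.List.slice_from_one]

theorem strictB_cons₂ (x y : Int) (t : List Int) :
    strictB (x :: y :: t) = ((decide (x < y) && decide (y ≤ x + 3)) && strictB (y :: t)) := by
  simp [strictB, PySem.List.slice_from_one, Bool.and_assoc]

theorem strictB_short (l : List Int) (h : l.length ≤ 1) : strictB l = true := by
  match l with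
  | [] => exact strictB_nil
  | [x] => exact strictB_singleton x
  | x :: y :: t => simp at h

-- a violating adjacent pair anywhere makes strictB false
theorem strictB_false_at (l : List Int) (k : Nat) (hk : k + 1 < l.length)
    (hbad : (decide (l.getD k 0 < l.getD (k+1) 0) && decide (l.getD (k+1) 0 ≤ l.getD k 0 + 3)) = false) :
    strictB l = false := by
  induction l generalizing k with
  | nil => simp at hk
  | cons x t ih =>
    match t, k with
    | y :: t', 0 =>
      simp only [List.getD_cons_zero, List.getD_cons_succ] at hbad
      simp [strictB_cons₂, hbad]
    | y :: t', k + 1 =>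
      simp only [List.getD_cons_succ] at hbad
      rw [strictB_cons₂]
      have := ih k (by simpa using hk) hbad
      simp [this]
    | [], _ => simp at hk

theorem firstBad_none_iff (l : List Int) : firstBad l = none ↔ strictB l = true := by
  induction l with
  | nil => simp [firstBad, strictB_nil]
  | cons x t ih =>
    match t with
    | [] => simp [firstBad, strictB_singleton]
    | y :: t' =>
      rw [firstBad, strictB_cons₂]
      by_cases h : (decide (x < y) && decide (y ≤ x + 3)) = true
      · simp [h, Option.map_eq_none_iff]
        simpa using ih
      · simp [Bool.eq_false_iff.mpr h]

theorem firstBad_some (l : List Int) (i : Nat) (h : firstBad l = some i) :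
    1 ≤ i ∧ i < l.length ∧
      (decide (l.getD (i-1) 0 < l.getD i 0) && decide (l.getD i 0 ≤ l.getD (i-1) 0 + 3)) = false := by
  induction l generalizing i with
  | nil => simp [firstBad] at h
  | cons x t ih =>
    match t with
    | [] => simp [firstBad] at h
    | y :: t' =>
      rw [firstBad] at h
      by_cases hok : (decide (x < y) && decide (y ≤ x + 3)) = true
      · rw [if_pos hok] at h
        rcases Option.map_eq_some_iff.mp h with ⟨i', hi', rfl⟩
        obtain ⟨h1, h2, h3⟩ := ih i' hi'
        refine ⟨by omega, by simp only [List.length_cons] at h2 ⊢; omega, ?_⟩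
        have e1 : i' + 1 - 1 = (i' - 1) + 1 := by omega
        simpa [e1, List.getD_cons_succ] using h3
      · rw [if_neg hok] at h
        simp only [Option.some.injEq] at h
        subst h
        refine ⟨le_refl 1, by simp, ?_⟩
        simpa using Bool.eq_false_iff.mpr hok

-- removing any index other than the two endpoints of a violating pair leaves it violating
theorem erase_other_false (l : List Int) (k j : Nat) (hk : k + 1 < l.length)
    (hbad : (decide (l.getD k 0 < l.getD (k+1) 0) && decide (l.getD (k+1) 0 ≤ l.getD k 0 + 3)) = false)
    (hj : j < l.length) (hjk : j ≠ k) (hjk1 : j ≠ k + 1) :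
    strictB (l.eraseIdx j) = false := by
  have hget : ∀ m : Nat, (l.eraseIdx j).getD m 0 = if m < j then l.getD m 0 else l.getD (m+1) 0 := by
    intro m
    simp only [List.getD, List.getElem?_eraseIdx]
    split <;> rfl
  have hlen : (l.eraseIdx j).length = l.length - 1 := List.length_eraseIdx_of_lt hj
  rcases Nat.lt_or_ge j k with hcase | hcase
  · -- j < k : pair survives at positions k-1, k
    apply strictB_false_at _ (k - 1) (by omega)
    have e1 : k - 1 + 1 = k := by omega
    rw [e1, hget, hget, if_neg (by omega), if_neg (by omega), e1]
    exact hbad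
  · -- j > k+1 : pair survives at positions k, k+1
    have hjgt : k + 1 < j := by omega
    apply strictB_false_at _ k (by omega)
    rw [hget, hget, if_pos (by omega), if_pos (by omega)]
    exact hbad

theorem badBridge (a b : Int) :
    (decide (a ≥ b) || decide (b - a > 3)) = !(decide (a < b) && decide (b ≤ a + 3)) := by
  by_cases h1 : a < b <;> by_cases h2 : b ≤ a + 3 <;> simp [h1, h2] <;> omega

-- the scan with base_list = False is Source B's strict check of the remaining suffix
theorem loopFalseAux (l : List Int) (k : Nat) : ∀ i, 1 ≤ i → l.length - i ≤ k →
    isAscLoop l false i = strictB (l.drop (i - 1)) := by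
  induction k with
  | zero =>
    intro i hi hk
    rw [isAscLoop, dif_neg (by omega)]
    exact (strictB_short _ (by simp; omega)).symm
  | succ k ih =>
    intro i hi hk
    by_cases h : i < l.length
    · rw [isAscLoop, dif_pos h]
      have e1 : ((i : Int) - 1) = ((i - 1 : Nat) : Int) := by omega
      simp only [e1, PySem.List.pyGetD_natCast]
      have hi1 : i - 1 < l.length := by omega
      have hdrop1 : l.drop (i - 1) = l.getD (i-1) 0 :: l.drop i := by
        have e : i - 1 + 1 = i := by omega
        rw [List.drop_eq_getElem_cons hi1, e, List.getD_eq_getElem l 0 hi1]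
      have hdrop2 : l.drop i = l.getD i 0 :: l.drop (i + 1) := by
        rw [List.getD_eq_getElem l 0 h, List.drop_eq_getElem_cons h]
      by_cases hbad : (decide (l.getD (i-1) 0 < l.getD i 0) && decide (l.getD i 0 ≤ l.getD (i-1) 0 + 3)) = true
      · rw [if_neg (by simp), if_neg (by simp only [badBridge, hbad]; simp)]
        rw [ih (i+1) (by omega) (by omega), hdrop1, hdrop2, strictB_cons₂, ← hdrop2, hbad]
        simp
      · have hbad' := Bool.eq_false_iff.mpr hbad
        rw [if_neg (by simp), if_pos (by simp only [badBridge, hbad']; simp)]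
        rw [hdrop1, hdrop2, strictB_cons₂, hbad']
        simp
    · rw [isAscLoop, dif_neg h]
      exact (strictB_short _ (by simp; omega)).symm

theorem loopFalse (l : List Int) (i : Nat) (hi : 1 ≤ i) :
    isAscLoop l false i = strictB (l.drop (i - 1)) :=
  loopFalseAux l (l.length - i) i hi (le_refl _)

-- A's comprehension over all one-removed sublists, abbreviated for the proofs
def pvAny (l : List Int) : Bool :=
  ((PySem.List.pyRange 0 (PySem.List.len l) 1).attach.map (fun j =>
      isAscLoop (PySem.List.slice l none (some j.1)
                  ++ PySem.List.slice l (some (j.1 + 1)) none) false 1)).any id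

theorem loopTrueAux (l : List Int) (k : Nat) : ∀ i, 1 ≤ i → l.length - i ≤ k →
    isAscLoop l true i = (if strictB (l.drop (i - 1)) then true else pvAny l) := by
  induction k with
  | zero =>
    intro i hi hk
    rw [isAscLoop, dif_neg (by omega), if_pos (strictB_short _ (by simp; omega))]
  | succ k ih =>
    intro i hi hk
    by_cases h : i < l.length
    · rw [isAscLoop, dif_pos h]
      have e1 : ((i : Int) - 1) = ((i - 1 : Nat) : Int) := by omega
      simp only [e1, PySem.List.pyGetD_natCast]
      have hi1 : i - 1 < l.length := by omega
      have hdrop1 : l.drop (i - 1) = l.getD (i-1) 0 :: l.drop i := by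
        have e : i - 1 + 1 = i := by omega
        rw [List.drop_eq_getElem_cons hi1, e, List.getD_eq_getElem l 0 hi1]
      have hdrop2 : l.drop i = l.getD i 0 :: l.drop (i + 1) := by
        rw [List.getD_eq_getElem l 0 h, List.drop_eq_getElem_cons h]
      by_cases hbad : (decide (l.getD (i-1) 0 < l.getD i 0) && decide (l.getD i 0 ≤ l.getD (i-1) 0 + 3)) = true
      · rw [if_neg (by simp only [badBridge, hbad]; simp), if_neg (by simp)]
        rw [ih (i+1) (by omega) (by omega), hdrop1, hdrop2, strictB_cons₂, ← hdrop2, hbad]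
        simp
      · have hbad' := Bool.eq_false_iff.mpr hbad
        rw [if_pos (by simp only [badBridge, hbad']; simp)]
        rw [hdrop1, hdrop2, strictB_cons₂, hbad']
        simp [pvAny]
    · rw [isAscLoop, dif_neg h, if_pos (strictB_short _ (by simp; omega))]

theorem loopTrue (l : List Int) (i : Nat) (hi : 1 ≤ i) :
    isAscLoop l true i = (if strictB (l.drop (i - 1)) then true else pvAny l) :=
  loopTrueAux l (l.length - i) i hi (le_refl _)

theorem pvAny_iff (l : List Int) :
    pvAny l = true ↔ ∃ j : Nat, j < l.length ∧ strictB (l.eraseIdx j) = true := by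
  unfold pvAny
  rw [List.any_eq_true]
  constructor
  · rintro ⟨x, hx, hres⟩
    rcases List.mem_map.mp hx with ⟨⟨j, hj⟩, _, rfl⟩
    simp only [id] at hres
    have hjr := PySem.List.mem_pyRange_one.mp hj
    rw [PySem.List.len_eq] at hjr
    rw [loopFalse _ 1 (le_refl _)] at hres
    simp only [Nat.sub_self, List.drop_zero] at hres
    rw [pvSliceErase l j hjr.1] at hres
    exact ⟨j.toNat, by omega, hres⟩
  · rintro ⟨j, hj, hres⟩
    refine ⟨_, List.mem_map.mpr ⟨⟨(j : Int), ?_⟩, List.mem_attach _ _, rfl⟩, ?_⟩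
    · exact PySem.List.mem_pyRange_one.mpr ⟨by omega, by rw [PySem.List.len_eq]; exact_mod_cast hj⟩
    · simp only [id]
      rw [loopFalse _ 1 (le_refl _)]
      simp only [Nat.sub_self, List.drop_zero]
      rw [pvSliceErase l (j : Int) (by omega)]
      simpa using hres

-- ===== VERDICT (by name: the statement is the Claim_ definition above) =====
theorem is_ascending_spec : Claim_equal_is_ascending := by
  unfold Claim_equal_is_ascending
  intro l b _
  unfold Spec_is_ascending is_ascending is_ascending_alt
  cases b with
  | false =>
    rw [loopFalse l 1 (le_refl _)]
    simp only [Nat.sub_self, List.drop_zero]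
    cases hfb : firstBad l with
    | none => simpa using (firstBad_none_iff l).mp hfb
    | some i =>
      have hs : strictB l = false := by
        apply Bool.eq_false_iff.mpr
        intro hs
        rw [(firstBad_none_iff l).mpr hs] at hfb
        simp at hfb
      simp [hs]
  | true =>
    rw [loopTrue l 1 (le_refl _)]
    simp only [Nat.sub_self, List.drop_zero]
    cases hfb : firstBad l with
    | none => rw [if_pos ((firstBad_none_iff l).mp hfb)]
    | some i =>
      have hs : strictB l = false := by
        apply Bool.eq_false_iff.mpr
        intro hs
        rw [(firstBad_none_iff l).mpr hs] at hfb
        simp at hfb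
      rw [if_neg (by simp [hs])]
      obtain ⟨hi1, hi2, hbad⟩ := firstBad_some l i hfb
      have e : i - 1 + 1 = i := by omega
      simp only [Bool.not_true, Bool.false_eq_true, if_false, removedB_eq]
      apply Bool.coe_iff_coe.mp
      rw [pvAny_iff]
      constructor
      · rintro ⟨j, hj, hres⟩
        rcases eq_or_ne j (i - 1) with rfl | hne1
        · simp [hres]
        rcases eq_or_ne j i with rfl | hne2
        · simp [hres]
        exfalso
        have := erase_other_false l (i - 1) j (by omega) (by rw [e]; exact hbad) hj hne1 (by omega)
        rw [hres] at this
        exact Bool.noConfusion this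
      · intro hor
        rcases Bool.or_eq_true_iff.mp hor with hres | hres
        · exact ⟨i - 1, by omega, hres⟩
        · exact ⟨i, hi2, hres⟩
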